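-- pv_equiv track=rewrite | github.com/IvanYachUkr/TerraPulse | scripts/run_mlp_overnight_v4.py | partition_features
-- ===== SOURCE A (Python) =====
-- def partition_features(full_cols):
--     band_prefixes = {"B02", "B03", "B04", "B05", "B06", "B07", "B08", "B8A", "B11", "B12"}
--     index_prefixes = {
--         "NDVI", "NDWI", "NDBI", "NDMI", "NBR", "SAVI", "BSI",
--         "NDRE1", "NDRE2", "EVI", "MSAVI", "CRI1", "CRI2", "MCARI", "MNDWI", "TC",
--     }
--
--     bands_idx, indices_idx = [], []
--     hog_idx, gabor_idx, lbp_idx, glcm_idx, mp_idx, sv_idx = [], [], [], [], [], []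
--
--     for i, col in enumerate(full_cols):
--         prefix = col.split("_")[0]
--         if col.startswith("delta"):
--             continue
--         elif prefix in band_prefixes:
--             bands_idx.append(i)
--         elif prefix in index_prefixes:
--             indices_idx.append(i)
--         elif prefix == "HOG":
--             hog_idx.append(i)
--         elif prefix == "Gabor":
--             gabor_idx.append(i)
--         elif prefix == "LBP":
--             lbp_idx.append(i)
--         elif prefix == "GLCM":
--             glcm_idx.append(i)
--         elif prefix == "MP":
--             mp_idx.append(i)
--         elif prefix == "SV":
--             sv_idx.append(i)
--
--     texture_all = hog_idx + gabor_idx + lbp_idx + glcm_idx + mp_idx + sv_idx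
--     bands_indices = bands_idx + indices_idx
--     full_no_deltas = [i for i, c in enumerate(full_cols) if not c.startswith("delta")]
--
--     return {
--         "bands_indices": bands_indices,
--         "bands_indices_texture": bands_indices + texture_all,
--         "bands_indices_hog": bands_indices + hog_idx,
--         "bands_indices_glcm_lbp": bands_indices + glcm_idx + lbp_idx,
--         "texture_all": texture_all,
--         "full_no_deltas": full_no_deltas,
--         "all_full": list(range(len(full_cols))),
--         # top500_full computed at runtime per fold
--     }
-- ===== SOURCE B (Python) =====
-- def partition_features(full_cols):
--     band_prefixes = {"B02", "B03", "B04", "B05", "B06", "B07", "B08", "B8A", "B11", "B12"}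
--     index_prefixes = {
--         "NDVI", "NDWI", "NDBI", "NDMI", "NBR", "SAVI", "BSI",
--         "NDRE1", "NDRE2", "EVI", "MSAVI", "CRI1", "CRI2", "MCARI", "MNDWI", "TC",
--     }
--
--     def bucket(pred):
--         return [i for i, c in enumerate(full_cols)
--                 if not c.startswith("delta") and pred(c.split("_")[0])]
--
--     bands_idx = bucket(lambda p: p in band_prefixes)
--     indices_idx = bucket(lambda p: p in index_prefixes)
--     hog_idx = bucket(lambda p: p == "HOG")
--     gabor_idx = bucket(lambda p: p == "Gabor")
--     lbp_idx = bucket(lambda p: p == "LBP")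
--     glcm_idx = bucket(lambda p: p == "GLCM")
--     mp_idx = bucket(lambda p: p == "MP")
--     sv_idx = bucket(lambda p: p == "SV")
--
--     texture_all = hog_idx + gabor_idx + lbp_idx + glcm_idx + mp_idx + sv_idx
--     bands_indices = bands_idx + indices_idx
--
--     return {
--         "bands_indices": bands_indices,
--         "bands_indices_texture": bands_indices + texture_all,
--         "bands_indices_hog": bands_indices + hog_idx,
--         "bands_indices_glcm_lbp": bands_indices + glcm_idx + lbp_idx,
--         "texture_all": texture_all,
--         "full_no_deltas": bucket(lambda p: True),
--         "all_full": list(range(len(full_cols))),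
--     }
-- ===== Notes on version B (the rewrite author's own statement) =====
-- stated objective: simpler
-- what changed: A's single classifying loop with an if/elif chain over eight accumulator lists is replaced by one small bucket helper applied per category: each index list is built by its own independent filtering comprehension over enumerate(full_cols).
import Mathlib
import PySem

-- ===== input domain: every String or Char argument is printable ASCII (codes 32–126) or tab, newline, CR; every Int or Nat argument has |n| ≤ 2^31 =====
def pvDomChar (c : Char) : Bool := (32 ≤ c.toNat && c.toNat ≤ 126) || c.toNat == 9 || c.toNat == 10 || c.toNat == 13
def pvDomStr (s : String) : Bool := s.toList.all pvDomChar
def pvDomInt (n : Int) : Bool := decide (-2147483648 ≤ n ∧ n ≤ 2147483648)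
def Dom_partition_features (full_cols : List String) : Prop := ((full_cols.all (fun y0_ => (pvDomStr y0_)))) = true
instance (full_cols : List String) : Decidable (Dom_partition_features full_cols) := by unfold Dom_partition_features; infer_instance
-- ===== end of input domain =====

-- B replaces A's single classifying loop over eight accumulators by independent
-- filtering comprehensions, one per bucket (objective: simpler decomposition; not faster).

-- ===== PORT A =====
-- Python set literals used only for membership tests; ported as literal lists.
def pvBandL : List String := ["B02", "B03", "B04", "B05", "B06", "B07", "B08", "B8A", "B11", "B12"]
def pvIdxL : List String :=
  ["NDVI", "NDWI", "NDBI", "NDMI", "NBR", "SAVI", "BSI",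
   "NDRE1", "NDRE2", "EVI", "MSAVI", "CRI1", "CRI2", "MCARI", "MNDWI", "TC"]

-- col.split("_")[0]: splitOn with a non-empty separator always returns a non-empty
-- list (as in Python), so index 0 is headD "" — exact.
def pvPfx (c : String) : String := ((PySem.Str.split? c "_").getD []).headD ""

structure PvSt where
  bands : List Int
  indices : List Int
  hog : List Int
  gabor : List Int
  lbp : List Int
  glcm : List Int
  mp : List Int
  sv : List Int
deriving Repr, DecidableEq

def pvLoopA : List (Int × String) → PvSt → PvSt
  | [], st => st
  | (i, c) :: rest, st =>
    let p := pvPfx c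
    if PySem.Str.startswith c "delta" then pvLoopA rest st
    else if pvBandL.contains p then pvLoopA rest { st with bands := st.bands ++ [i] }
    else if pvIdxL.contains p then pvLoopA rest { st with indices := st.indices ++ [i] }
    else if p = "HOG" then pvLoopA rest { st with hog := st.hog ++ [i] }
    else if p = "Gabor" then pvLoopA rest { st with gabor := st.gabor ++ [i] }
    else if p = "LBP" then pvLoopA rest { st with lbp := st.lbp ++ [i] }
    else if p = "GLCM" then pvLoopA rest { st with glcm := st.glcm ++ [i] }
    else if p = "MP" then pvLoopA rest { st with mp := st.mp ++ [i] }
    else if p = "SV" then pvLoopA rest { st with sv := st.sv ++ [i] }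
    else pvLoopA rest st

def partition_features (full_cols : List String) : List (String × List Int) :=
  let st := pvLoopA (PySem.List.enumerate full_cols 0) ⟨[], [], [], [], [], [], [], []⟩
  let texture_all := st.hog ++ st.gabor ++ st.lbp ++ st.glcm ++ st.mp ++ st.sv
  let bands_indices := st.bands ++ st.indices
  let full_no_deltas := (PySem.List.enumerate full_cols 0).filterMap
      (fun ic => if PySem.Str.startswith ic.2 "delta" then none else some ic.1)
  [("bands_indices", bands_indices),
   ("bands_indices_texture", bands_indices ++ texture_all),
   ("bands_indices_hog", bands_indices ++ st.hog),
   ("bands_indices_glcm_lbp", bands_indices ++ st.glcm ++ st.lbp),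
   ("texture_all", texture_all),
   ("full_no_deltas", full_no_deltas),
   ("all_full", PySem.List.pyRange 0 (full_cols.length : Int) 1)]

-- ===== PORT B =====
def pvBucket (full_cols : List String) (pred : String → Bool) : List Int :=
  (PySem.List.enumerate full_cols 0).filterMap
    (fun ic => if !PySem.Str.startswith ic.2 "delta" && pred (pvPfx ic.2) then some ic.1 else none)

def partition_features_alt (full_cols : List String) : List (String × List Int) :=
  let bands_idx := pvBucket full_cols (fun p => pvBandL.contains p)
  let indices_idx := pvBucket full_cols (fun p => pvIdxL.contains p)
  let hog_idx := pvBucket full_cols (fun p => p == "HOG")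
  let gabor_idx := pvBucket full_cols (fun p => p == "Gabor")
  let lbp_idx := pvBucket full_cols (fun p => p == "LBP")
  let glcm_idx := pvBucket full_cols (fun p => p == "GLCM")
  let mp_idx := pvBucket full_cols (fun p => p == "MP")
  let sv_idx := pvBucket full_cols (fun p => p == "SV")
  let texture_all := hog_idx ++ gabor_idx ++ lbp_idx ++ glcm_idx ++ mp_idx ++ sv_idx
  let bands_indices := bands_idx ++ indices_idx
  [("bands_indices", bands_indices),
   ("bands_indices_texture", bands_indices ++ texture_all),
   ("bands_indices_hog", bands_indices ++ hog_idx),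
   ("bands_indices_glcm_lbp", bands_indices ++ glcm_idx ++ lbp_idx),
   ("texture_all", texture_all),
   ("full_no_deltas", pvBucket full_cols (fun _ => true)),
   ("all_full", PySem.List.pyRange 0 (full_cols.length : Int) 1)]

-- ===== PRECONDITION & SPEC =====
def Spec_partition_features (full_cols : List String) (out : List (String × List Int)) : Prop := out = partition_features_alt full_cols
instance (full_cols : List String) (out : List (String × List Int)) : Decidable (Spec_partition_features full_cols out) := by unfold Spec_partition_features; infer_instance

-- ===== CLAIM (what is proved, stated in full; the proofs are below) =====
def Claim_equal_partition_features : Prop := ∀ (full_cols : List String), Dom_partition_features full_cols → Spec_partition_features full_cols (partition_features full_cols)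

-- ===== LEMMAS AND PROOFS =====

-- B's bucket over an arbitrary enumerated list (pvBucket cols pred = pvBk (enumerate cols 0) pred).
def pvBk (l : List (Int × String)) (pred : String → Bool) : List Int :=
  l.filterMap (fun ic => if !PySem.Str.startswith ic.2 "delta" && pred (pvPfx ic.2) then some ic.1 else none)

lemma pvBand_excl (p : String) (h : p ∈ pvBandL) :
    p ∉ pvIdxL ∧ p ≠ "HOG" ∧ p ≠ "Gabor" ∧ p ≠ "LBP" ∧ p ≠ "GLCM" ∧ p ≠ "MP" ∧ p ≠ "SV" := by
  simp [pvBandL] at h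
  rcases h with rfl | rfl | rfl | rfl | rfl | rfl | rfl | rfl | rfl | rfl <;> decide

lemma pvIdx_excl (p : String) (h : p ∈ pvIdxL) :
    p ≠ "HOG" ∧ p ≠ "Gabor" ∧ p ≠ "LBP" ∧ p ≠ "GLCM" ∧ p ≠ "MP" ∧ p ≠ "SV" := by
  simp [pvIdxL] at h
  rcases h with rfl | rfl | rfl | rfl | rfl | rfl | rfl | rfl | rfl | rfl | rfl | rfl | rfl | rfl | rfl | rfl <;> decide

lemma pvLoopA_eq (l : List (Int × String)) (st : PvSt) :
    pvLoopA l st =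
      ⟨st.bands ++ pvBk l (fun p => pvBandL.contains p),
       st.indices ++ pvBk l (fun p => pvIdxL.contains p),
       st.hog ++ pvBk l (fun p => p == "HOG"),
       st.gabor ++ pvBk l (fun p => p == "Gabor"),
       st.lbp ++ pvBk l (fun p => p == "LBP"),
       st.glcm ++ pvBk l (fun p => p == "GLCM"),
       st.mp ++ pvBk l (fun p => p == "MP"),
       st.sv ++ pvBk l (fun p => p == "SV")⟩ := by
  induction l generalizing st with
  | nil => cases st; simp [pvLoopA, pvBk]
  | cons ic rest ih =>
    obtain ⟨i, c⟩ := ic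
    by_cases hd : PySem.Str.startswith c "delta" = true
    · simp at hd
      simp [pvLoopA, hd, pvBk, ih]
    · simp at hd
      by_cases hb : pvPfx c ∈ pvBandL
      · obtain ⟨h1, h2, h3, h4, h5, h6, h7⟩ := pvBand_excl _ hb
        simp [pvBandL] at hb
        simp [pvIdxL] at h1
        simp [pvLoopA, hd, hb, pvBk, ih, h1, h2, h3, h4, h5, h6, h7, pvBandL, pvIdxL]
      · by_cases hi : pvPfx c ∈ pvIdxL
        · obtain ⟨h2, h3, h4, h5, h6, h7⟩ := pvIdx_excl _ hi
          simp [pvBandL] at hb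
          simp [pvIdxL] at hi
          simp [pvLoopA, hd, hb, hi, pvBk, ih, h2, h3, h4, h5, h6, h7, pvBandL, pvIdxL]
        · simp [pvBandL] at hb
          simp [pvIdxL] at hi
          by_cases hh : pvPfx c = "HOG"
          · simp [pvLoopA, hd, hb, hi, hh, pvBk, ih, pvBandL, pvIdxL]
          · by_cases hg : pvPfx c = "Gabor"
            · simp [pvLoopA, hd, hb, hi, hh, hg, pvBk, ih, pvBandL, pvIdxL]
            · by_cases hl : pvPfx c = "LBP"
              · simp [pvLoopA, hd, hb, hi, hh, hg, hl, pvBk, ih, pvBandL, pvIdxL]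
              · by_cases hm : pvPfx c = "GLCM"
                · simp [pvLoopA, hd, hb, hi, hh, hg, hl, hm, pvBk, ih, pvBandL, pvIdxL]
                · by_cases hp : pvPfx c = "MP"
                  · simp [pvLoopA, hd, hb, hi, hh, hg, hl, hm, hp, pvBk, ih, pvBandL, pvIdxL]
                  · by_cases hs : pvPfx c = "SV"
                    · simp [pvLoopA, hd, hb, hi, hh, hg, hl, hm, hp, hs, pvBk, ih, pvBandL, pvIdxL]
                    · simp [pvLoopA, hd, hb, hi, hh, hg, hl, hm, hp, hs, pvBk, ih, pvBandL, pvIdxL]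

lemma pvNoDelta_eq (full_cols : List String) :
    (PySem.List.enumerate full_cols 0).filterMap
        (fun ic => if PySem.Str.startswith ic.2 "delta" then none else some ic.1)
      = pvBucket full_cols (fun _ => true) := by
  unfold pvBucket
  congr 1
  funext ic
  cases h : PySem.Str.startswith ic.2 "delta" <;> simp [h]

-- ===== VERDICT (by name: the statement is the Claim_ definition above) =====
theorem partition_features_spec : Claim_equal_partition_features := by
  intro full_cols _
  show partition_features full_cols = partition_features_alt full_cols
  unfold partition_features partition_features_alt
  rw [pvLoopA_eq, pvNoDelta_eq]
  rfl
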